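-- pv_equiv track=rewrite | github.com/MColot/Data-acquisition-protocol-for-synchronized-EMG-EEG-and-hand-joint-angles | dataAnalysis/mainClassification.py | ComputeErrorsDurations
-- ===== SOURCE A (Python) =====
-- def ComputeErrorsDurations(p, y):
--     curr = 0
--     errors = []
--     for i in range(1, len(y)):
--         if y[i] == y[i-1] and y[i] != p[i]:
--             curr+=1
--         elif curr > 0:
--             errors.append(curr)
--             curr=0
--     return errors
-- ===== SOURCE B (Python) =====
-- def ComputeErrorsDurations(p, y):
--     # different decomposition: materialise the per-step condition list, then
--     # split it into maximal runs and keep the length of every True run that is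
--     # not the final run (a trailing error run is never recorded, as in A)
--     conds = [y[i] == y[i - 1] and y[i] != p[i] for i in range(1, len(y))]
--     groups = []
--     i = 0
--     while i < len(conds):
--         j = i
--         while j < len(conds) and conds[j] == conds[i]:
--             j += 1
--         groups.append((conds[i], j - i))
--         i = j
--     return [n for k, n in groups[:-1] if k]
-- ===== Notes on version B (the rewrite author's own statement) =====
-- stated objective: alternative
-- what changed: Replaces the stateful counter loop by first materialising the boolean condition list, then splitting it into maximal runs and keeping the length of each True run except the final run.
import Mathlib
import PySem

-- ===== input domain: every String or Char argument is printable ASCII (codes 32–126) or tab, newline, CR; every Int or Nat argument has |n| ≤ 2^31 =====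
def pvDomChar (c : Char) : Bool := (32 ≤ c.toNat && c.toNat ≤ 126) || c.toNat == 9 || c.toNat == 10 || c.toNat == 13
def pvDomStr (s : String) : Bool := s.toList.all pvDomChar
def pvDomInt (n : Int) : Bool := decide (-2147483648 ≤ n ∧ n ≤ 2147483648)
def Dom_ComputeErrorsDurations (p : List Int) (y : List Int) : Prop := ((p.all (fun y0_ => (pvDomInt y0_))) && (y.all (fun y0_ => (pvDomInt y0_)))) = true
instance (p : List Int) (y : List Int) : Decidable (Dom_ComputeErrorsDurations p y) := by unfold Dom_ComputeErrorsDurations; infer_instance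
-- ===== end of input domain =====

-- B replaces A's stateful counter loop by a condition list split into maximal runs
-- (every True run except the final one is kept): a different decomposition, same cost.

-- ===== PORT A =====
def ComputeErrorsDurations (p : List Int) (y : List Int) : List Int :=
  ((PySem.List.pyRange 1 y.length 1).foldl
    (fun (s : Int × List Int) i =>
      if PySem.List.pyGetD y i 0 = PySem.List.pyGetD y (i - 1) 0 ∧
         PySem.List.pyGetD y i 0 ≠ PySem.List.pyGetD p i 0 then
        (s.1 + 1, s.2)
      else if s.1 > 0 then (0, s.2 ++ [s.1]) else s)
    (0, [])).2

-- ===== PORT B =====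
-- run-splitting of Source B's inner while loops (maximal equal runs with their lengths)
def pvRuns : List Bool → List (Bool × Int)
  | [] => []
  | c :: cs =>
    (c, 1 + (cs.takeWhile (· == c)).length) :: pvRuns (cs.dropWhile (· == c))
termination_by l => l.length
decreasing_by
  simp only [List.length_cons]
  exact Nat.lt_succ_of_le (List.length_dropWhile_le _ _)

def ComputeErrorsDurations_alt (p : List Int) (y : List Int) : List Int :=
  let conds := (PySem.List.pyRange 1 y.length 1).map (fun i =>
    decide (PySem.List.pyGetD y i 0 = PySem.List.pyGetD y (i - 1) 0 ∧
            PySem.List.pyGetD y i 0 ≠ PySem.List.pyGetD p i 0))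
  (((pvRuns conds).dropLast.filter (fun g => g.1)).map (fun g => g.2))

-- ===== PRECONDITION & SPEC =====
-- Pre_ excludes exactly the inputs on which Python A raises IndexError:
-- some index i with y[i] == y[i-1] but i out of range for p.
def Pre_ComputeErrorsDurations (p : List Int) (y : List Int) : Prop :=
  ∀ i ∈ List.range y.length, 1 ≤ i → y.getD i 0 = y.getD (i - 1) 0 → i < p.length
instance (p : List Int) (y : List Int) : Decidable (Pre_ComputeErrorsDurations p y) := by
  unfold Pre_ComputeErrorsDurations; infer_instance

def pvWitness_ComputeErrorsDurations : List Int × List Int := ([0, 1], [1, 1, 2])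

def Spec_ComputeErrorsDurations (p : List Int) (y : List Int) (out : List Int) : Prop :=
  out = ComputeErrorsDurations_alt p y
instance (p : List Int) (y : List Int) (out : List Int) :
    Decidable (Spec_ComputeErrorsDurations p y out) := by
  unfold Spec_ComputeErrorsDurations; infer_instance

-- ===== CLAIM (what is proved, stated in full; the proofs are below) =====
def Claim_equal_ComputeErrorsDurations : Prop :=
  ∀ (p : List Int) (y : List Int), Dom_ComputeErrorsDurations p y →
    Pre_ComputeErrorsDurations p y →
    Spec_ComputeErrorsDurations p y (ComputeErrorsDurations p y)

-- ===== LEMMAS AND PROOFS =====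

-- A's loop state transition, as a function of the step's boolean condition
def pvStep (s : Int × List Int) (c : Bool) : Int × List Int :=
  if c then (s.1 + 1, s.2) else if s.1 > 0 then (0, s.2 ++ [s.1]) else s

-- the tail of A's output from a current counter value (0 ≤ curr)
def pvG : Int → List Bool → List Int
  | _, [] => []
  | curr, true :: cs => pvG (curr + 1) cs
  | curr, false :: cs => if curr > 0 then curr :: pvG 0 cs else pvG 0 cs

lemma pvStep_decide (s : Int × List Int) (P : Prop) [Decidable P] :
    pvStep s (decide P) =
      if P then (s.1 + 1, s.2) else if s.1 > 0 then (0, s.2 ++ [s.1]) else s := by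
  by_cases h : P <;> simp [pvStep, h]

lemma foldl_pvStep : ∀ (cs : List Bool) (curr : Int) (errors : List Int), 0 ≤ curr →
    (cs.foldl pvStep (curr, errors)).2 = errors ++ pvG curr cs := by
  intro cs
  induction cs with
  | nil => intro curr errors _; simp [pvG]
  | cons c cs ih =>
    intro curr errors h
    cases c with
    | true =>
      simpa [pvStep, pvG] using ih (curr + 1) errors (by omega)
    | false =>
      have hstep : pvStep (curr, errors) false =
          if curr > 0 then (0, errors ++ [curr]) else (curr, errors) := by
        simp [pvStep]
      by_cases hc : curr > 0
      · rw [List.foldl_cons, hstep, if_pos hc, ih 0 (errors ++ [curr]) le_rfl]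
        simp [pvG, hc]
      · have hc0 : curr = 0 := by omega
        subst hc0
        rw [List.foldl_cons, hstep, if_neg hc, ih 0 errors le_rfl]
        simp [pvG]

lemma pvG_true_run : ∀ (run : List Bool), (∀ c ∈ run, c = true) →
    ∀ (curr : Int) (cs : List Bool), pvG curr (run ++ cs) = pvG (curr + run.length) cs := by
  intro run
  induction run with
  | nil => intro _ curr cs; simp
  | cons a t ih =>
    intro h curr cs
    have ha : a = true := h a (by simp)
    subst ha
    have := ih (fun c hc => h c (by simp [hc])) (curr + 1) cs
    simp only [List.cons_append, pvG, this, List.length_cons]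
    congr 1
    push_cast
    ring

lemma pvG_false_run : ∀ (run : List Bool), (∀ c ∈ run, c = false) →
    ∀ (cs : List Bool), pvG 0 (run ++ cs) = pvG 0 cs := by
  intro run
  induction run with
  | nil => intro _ cs; simp
  | cons a t ih =>
    intro h cs
    have ha : a = false := h a (by simp)
    subst ha
    simp only [List.cons_append, pvG]
    rw [if_neg (by omega)]
    exact ih (fun c hc => h c (by simp [hc])) cs

lemma dropWhile_head_false {q : Bool → Bool} :
    ∀ (l : List Bool) (a : Bool) (t : List Bool), l.dropWhile q = a :: t → q a = false := by
  intro l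
  induction l with
  | nil => intro a t h; simp at h
  | cons b l ih =>
    intro a t h
    rw [List.dropWhile_cons] at h
    by_cases hb : q b = true
    · rw [if_pos hb] at h; exact ih a t h
    · rw [if_neg hb] at h
      cases h
      simpa using hb

lemma pvRuns_cons_ne_nil (c : Bool) (cs : List Bool) : pvRuns (c :: cs) ≠ [] := by
  rw [pvRuns]; simp

lemma pvG_eq_runs_aux : ∀ (n : Nat) (l : List Bool), l.length ≤ n →
    pvG 0 l = (((pvRuns l).dropLast.filter (fun g => g.1)).map (fun g => g.2)) := by
  intro n
  induction n with
  | zero =>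
    intro l h
    have : l = [] := by cases l <;> simp_all
    subst this; simp [pvG, pvRuns]
  | succ n ih =>
    intro l h
    cases l with
    | nil => simp [pvG, pvRuns]
    | cons c cs =>
      have hsplit : cs.takeWhile (· == c) ++ cs.dropWhile (· == c) = cs :=
        List.takeWhile_append_dropWhile
      have hrestlen : (cs.dropWhile (· == c)).length ≤ n := by
        have := List.length_dropWhile_le (· == c) cs
        simp only [List.length_cons] at h
        omega
      rw [pvRuns]
      cases c with
      | true =>
        have hrun : ∀ x ∈ cs.takeWhile (· == true), x = true := by
          intro x hx
          simpa using List.mem_takeWhile_imp hx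
        have hG : pvG 0 (true :: cs) =
            pvG (1 + ((cs.takeWhile (· == true)).length : Int)) (cs.dropWhile (· == true)) := by
          rw [pvG]
          conv_lhs => rw [← hsplit]
          rw [pvG_true_run _ hrun]
          norm_num
        rw [hG]
        cases hrest : cs.dropWhile (· == true) with
        | nil => simp [pvG, pvRuns]
        | cons r rest' =>
          have hr : r = false := by
            have := dropWhile_head_false cs r rest' hrest
            cases r <;> simp_all
          subst hr
          rw [List.dropLast_cons_of_ne_nil (pvRuns_cons_ne_nil _ _)]
          rw [List.filter_cons_of_pos (by simp)]
          rw [List.map_cons]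
          rw [← ih (false :: rest') (hrest ▸ hrestlen)]
          have hpos : (1 : Int) + ((cs.takeWhile (· == true)).length : Int) > 0 := by
            positivity
          simp only [pvG]
          rw [if_pos hpos, if_neg (by omega : ¬ ((0 : Int) > 0))]
      | false =>
        have hrun : ∀ x ∈ cs.takeWhile (· == false), x = false := by
          intro x hx
          simpa using List.mem_takeWhile_imp hx
        have hG : pvG 0 (false :: cs) = pvG 0 (cs.dropWhile (· == false)) := by
          rw [pvG, if_neg (by omega : ¬ ((0 : Int) > 0))]
          conv_lhs => rw [← hsplit]
          exact pvG_false_run _ hrun _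
        rw [hG]
        cases hrest : cs.dropWhile (· == false) with
        | nil => simp [pvG, pvRuns]
        | cons r rest' =>
          rw [List.dropLast_cons_of_ne_nil (pvRuns_cons_ne_nil _ _)]
          rw [List.filter_cons_of_neg (by simp)]
          exact ih (r :: rest') (hrest ▸ hrestlen)

lemma pvG_eq_runs (l : List Bool) :
    pvG 0 l = (((pvRuns l).dropLast.filter (fun g => g.1)).map (fun g => g.2)) :=
  pvG_eq_runs_aux l.length l le_rfl

-- ===== VERDICT (by name: the statement is the Claim_ definition above) =====
theorem ComputeErrorsDurations_spec : Claim_equal_ComputeErrorsDurations := by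
  intro p y _ _
  unfold Spec_ComputeErrorsDurations ComputeErrorsDurations ComputeErrorsDurations_alt
  rw [← pvG_eq_runs]
  have hmap :
      ((PySem.List.pyRange 1 y.length 1).map (fun i =>
        decide (PySem.List.pyGetD y i 0 = PySem.List.pyGetD y (i - 1) 0 ∧
                PySem.List.pyGetD y i 0 ≠ PySem.List.pyGetD p i 0))).foldl pvStep ((0 : Int), ([] : List Int))
      = (PySem.List.pyRange 1 y.length 1).foldl
          (fun (s : Int × List Int) i =>
            if PySem.List.pyGetD y i 0 = PySem.List.pyGetD y (i - 1) 0 ∧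
               PySem.List.pyGetD y i 0 ≠ PySem.List.pyGetD p i 0 then
              (s.1 + 1, s.2)
            else if s.1 > 0 then (0, s.2 ++ [s.1]) else s)
          ((0 : Int), ([] : List Int)) := by
    rw [List.foldl_map]
    simp only [pvStep_decide]
  rw [← hmap, foldl_pvStep _ 0 [] le_rfl]
  simp
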